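-- pv_equiv track=rewrite | github.com/AlexNoske/PolyFind | PolyFind.py | polyNU3
-- ===== SOURCE A (Python) =====
-- def polyNU3(noNodesG1,noNodesG2):
--     constraints=[]
--     constraint="cnf(sml,axiom,t(Y,X,X)=X"
--     if (noNodesG2<noNodesG1):
--         for i in range(noNodesG2,noNodesG1):
--             constraint = constraint + "|X=" + str(i)
--     elif (noNodesG1<noNodesG2):
--         for i in range(noNodesG1,noNodesG2):
--             constraint = constraint + "|X=" + str(i)
--     constraint = constraint + ").\n"
--     constraints.append(constraint)
--     constraint="cnf(sml,axiom,t(X,Y,X)=X"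
--     if (noNodesG2<noNodesG1):
--         for i in range(noNodesG2,noNodesG1):
--             constraint = constraint + "|X=" + str(i)
--     elif (noNodesG1<noNodesG2):
--         for i in range(noNodesG1,noNodesG2):
--             constraint = constraint + "|X=" + str(i)
--     constraint = constraint + ").\n"
--     constraints.append(constraint)
--     constraint="cnf(sml,axiom,t(X,X,Y)=X"
--     if (noNodesG2<noNodesG1):
--         for i in range(noNodesG2,noNodesG1):
--             constraint = constraint + "|X=" + str(i)
--     elif (noNodesG1<noNodesG2):
--         for i in range(noNodesG1,noNodesG2):
--             constraint = constraint + "|X=" + str(i)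
--     constraint = constraint + ").\n"
--     constraints.append(constraint)
--     return constraints
-- ===== SOURCE B (Python) =====
-- def polyNU3(noNodesG1, noNodesG2):
--     lo = min(noNodesG1, noNodesG2)
--     hi = max(noNodesG1, noNodesG2)
--     # build the shared closing tail once, back-to-front, by prepending
--     t = ").\n"
--     for i in reversed(range(lo, hi)):
--         t = "|X=" + str(i) + t
--     return ["cnf(sml,axiom,t(Y,X,X)=X" + t,
--             "cnf(sml,axiom,t(X,Y,X)=X" + t,
--             "cnf(sml,axiom,t(X,X,Y)=X" + t]
-- ===== Notes on version B (the rewrite author's own statement) =====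
-- stated objective: alternative
-- what changed: B replaces A's three copy-pasted ascending left-to-right accumulation loops by one descending loop that builds the shared closing tail '|X=lo...|X=hi-1).\n' back-to-front by prepending over reversed(range(min,max)), then returns the three literal prefixes concatenated with that single tail.
import Mathlib
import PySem

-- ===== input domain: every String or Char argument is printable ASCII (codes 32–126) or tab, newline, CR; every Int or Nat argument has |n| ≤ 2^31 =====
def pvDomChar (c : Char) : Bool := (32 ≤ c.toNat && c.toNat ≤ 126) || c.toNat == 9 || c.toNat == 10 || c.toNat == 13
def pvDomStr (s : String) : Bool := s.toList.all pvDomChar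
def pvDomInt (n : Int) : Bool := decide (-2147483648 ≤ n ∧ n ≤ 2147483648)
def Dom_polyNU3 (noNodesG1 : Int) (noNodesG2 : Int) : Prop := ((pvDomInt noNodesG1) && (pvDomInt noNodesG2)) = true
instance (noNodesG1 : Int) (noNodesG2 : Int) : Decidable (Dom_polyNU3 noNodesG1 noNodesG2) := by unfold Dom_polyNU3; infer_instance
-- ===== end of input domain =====

-- B builds the shared closing tail once, back-to-front with a single descending loop
-- over [min,max) that prepends, and attaches it to the three literal prefixes,
-- replacing A's three copy-pasted ascending accumulation loops (objective: alternative).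

-- ===== PORT A =====
def polyNU3 (noNodesG1 : Int) (noNodesG2 : Int) : List String :=
  let constraints : List String := []
  let constraint := "cnf(sml,axiom,t(Y,X,X)=X"
  let constraint :=
    if noNodesG2 < noNodesG1 then
      (PySem.List.pyRange noNodesG2 noNodesG1 1).foldl
        (fun c i => c ++ "|X=" ++ PySem.Int.toStr i) constraint
    else if noNodesG1 < noNodesG2 then
      (PySem.List.pyRange noNodesG1 noNodesG2 1).foldl
        (fun c i => c ++ "|X=" ++ PySem.Int.toStr i) constraint
    else constraint
  let constraint := constraint ++ ").\n"
  let constraints := constraints ++ [constraint]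
  let constraint := "cnf(sml,axiom,t(X,Y,X)=X"
  let constraint :=
    if noNodesG2 < noNodesG1 then
      (PySem.List.pyRange noNodesG2 noNodesG1 1).foldl
        (fun c i => c ++ "|X=" ++ PySem.Int.toStr i) constraint
    else if noNodesG1 < noNodesG2 then
      (PySem.List.pyRange noNodesG1 noNodesG2 1).foldl
        (fun c i => c ++ "|X=" ++ PySem.Int.toStr i) constraint
    else constraint
  let constraint := constraint ++ ").\n"
  let constraints := constraints ++ [constraint]
  let constraint := "cnf(sml,axiom,t(X,X,Y)=X"
  let constraint :=
    if noNodesG2 < noNodesG1 then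
      (PySem.List.pyRange noNodesG2 noNodesG1 1).foldl
        (fun c i => c ++ "|X=" ++ PySem.Int.toStr i) constraint
    else if noNodesG1 < noNodesG2 then
      (PySem.List.pyRange noNodesG1 noNodesG2 1).foldl
        (fun c i => c ++ "|X=" ++ PySem.Int.toStr i) constraint
    else constraint
  let constraint := constraint ++ ").\n"
  let constraints := constraints ++ [constraint]
  constraints

-- ===== PORT B =====
def polyNU3_alt (noNodesG1 : Int) (noNodesG2 : Int) : List String :=
  let lo := min noNodesG1 noNodesG2
  let hi := max noNodesG1 noNodesG2
  -- 'for i in reversed(range(lo,hi)): t = "|X=" + str(i) + t'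
  let t := (PySem.List.pyRange lo hi 1).reverse.foldl
    (fun t i => "|X=" ++ PySem.Int.toStr i ++ t) ").\n"
  ["cnf(sml,axiom,t(Y,X,X)=X" ++ t,
   "cnf(sml,axiom,t(X,Y,X)=X" ++ t,
   "cnf(sml,axiom,t(X,X,Y)=X" ++ t]

-- ===== PRECONDITION & SPEC =====
def Spec_polyNU3 (noNodesG1 : Int) (noNodesG2 : Int) (out : List String) : Prop := out = polyNU3_alt noNodesG1 noNodesG2
instance (noNodesG1 : Int) (noNodesG2 : Int) (out : List String) : Decidable (Spec_polyNU3 noNodesG1 noNodesG2 out) := by unfold Spec_polyNU3; infer_instance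

-- ===== CLAIM =====
def Claim_equal_polyNU3 : Prop := ∀ (noNodesG1 : Int) (noNodesG2 : Int), Dom_polyNU3 noNodesG1 noNodesG2 → Spec_polyNU3 noNodesG1 noNodesG2 (polyNU3 noNodesG1 noNodesG2)

-- ===== LEMMAS AND PROOFS =====

-- B's backwards prepending loop is a foldr over the range
lemma pv_rev_foldl (l : List Int) :
    l.reverse.foldl (fun t i => "|X=" ++ PySem.Int.toStr i ++ t) ").\n"
      = l.foldr (fun i t => "|X=" ++ PySem.Int.toStr i ++ t) ").\n" := by
  rw [List.foldl_reverse]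

-- A's left-to-right accumulation followed by ").\n" equals pre ++ the foldr tail
lemma pv_fold_tail (l : List Int) : ∀ (pre : String),
    l.foldl (fun c i => c ++ "|X=" ++ PySem.Int.toStr i) pre ++ ").\n"
      = pre ++ l.foldr (fun i t => "|X=" ++ PySem.Int.toStr i ++ t) ").\n" := by
  induction l with
  | nil => intro pre; simp
  | cons x xs ih =>
      intro pre
      simp only [List.foldl_cons, List.foldr_cons, ih]
      simp [String.append_assoc]

-- every branch of A's if/elif, with ").\n" appended, equals pre ++ B's tail over [min,max)
lemma pv_branch (g1 g2 : Int) (pre : String) :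
    (if g2 < g1 then
        (PySem.List.pyRange g2 g1 1).foldl (fun c i => c ++ "|X=" ++ PySem.Int.toStr i) pre
     else if g1 < g2 then
        (PySem.List.pyRange g1 g2 1).foldl (fun c i => c ++ "|X=" ++ PySem.Int.toStr i) pre
     else pre) ++ ").\n"
      = pre ++ (PySem.List.pyRange (min g1 g2) (max g1 g2) 1).reverse.foldl
          (fun t i => "|X=" ++ PySem.Int.toStr i ++ t) ").\n" := by
  rw [pv_rev_foldl]
  split_ifs with h1 h2
  · rw [min_eq_right h1.le, max_eq_left h1.le, pv_fold_tail]
  · rw [min_eq_left h2.le, max_eq_right h2.le, pv_fold_tail]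
  · have hmm : min g1 g2 = g1 ∧ max g1 g2 = g1 := by omega
    rw [hmm.1, hmm.2, PySem.List.pyRange_one_eq_nil (le_refl g1)]
    simp

-- ===== VERDICT =====
theorem polyNU3_spec : Claim_equal_polyNU3 := by
  intro g1 g2 _
  show polyNU3 g1 g2 = polyNU3_alt g1 g2
  unfold polyNU3 polyNU3_alt
  simp only [List.nil_append]
  rw [pv_branch, pv_branch, pv_branch]; rfl
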